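-- pv_equiv track=rewrite | github.com/asanwari/AlgoForSeqAnalysis | 3/assignment3.py | makeTypeArray
-- ===== SOURCE A (Python) =====
-- def makeTypeArray(text):
-- 	# if empty string, simply return an S for $
-- 	textLength = len(text)
-- 	if textLength == 1:
-- 		return ['S']
-- 	#type array has the same length as text
-- 	# -1 just means unassigned
-- 	typeArray = [-1] * textLength
-- 	#last char ($) will always be type S
-- 	typeArray[-1] = 'S'
-- 	# 2nd last char will always be an L since all chars are greater than $
-- 	typeArray[-2] = 'L'
--
-- 	# iterate in reverse and assign type
-- 	for i in range(len(text)-2, -1, -1):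
-- 		if text[i] > text[i+1]:
-- 			typeArray[i] = 'L'
-- 		elif text[i] == text[i+1]:
-- 			typeArray[i] = typeArray[i+1]
-- 		else:
-- 			typeArray[i] = 'S'
-- 	return typeArray
-- ===== SOURCE B (Python) =====
-- def makeTypeArray(text):
--     # Group text into maximal runs of equal characters, then label each
--     # run as a whole: the last run is all 'S'; an earlier run is all 'L'
--     # iff its character is greater than the next run's character.
--     runs = []
--     n = len(text)
--     i = 0
--     while i < n:
--         j = i + 1
--         while j < n and text[j] == text[i]:
--             j += 1
--         runs.append((text[i], j - i))
--         i = j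
--     out = []
--     for k, (ch, cnt) in enumerate(runs):
--         if k + 1 < len(runs) and ch > runs[k + 1][0]:
--             out.extend(['L'] * cnt)
--         else:
--             out.extend(['S'] * cnt)
--     return out
-- ===== Notes on version B (the rewrite author's own statement) =====
-- stated objective: alternative
-- what changed: B groups the text into maximal runs of equal characters and labels each run as a whole by comparing its character with the next run's character (last run all 'S'), instead of A's reverse per-character pass that copies labels through equal neighbours via an in-place array.
import Mathlib
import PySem

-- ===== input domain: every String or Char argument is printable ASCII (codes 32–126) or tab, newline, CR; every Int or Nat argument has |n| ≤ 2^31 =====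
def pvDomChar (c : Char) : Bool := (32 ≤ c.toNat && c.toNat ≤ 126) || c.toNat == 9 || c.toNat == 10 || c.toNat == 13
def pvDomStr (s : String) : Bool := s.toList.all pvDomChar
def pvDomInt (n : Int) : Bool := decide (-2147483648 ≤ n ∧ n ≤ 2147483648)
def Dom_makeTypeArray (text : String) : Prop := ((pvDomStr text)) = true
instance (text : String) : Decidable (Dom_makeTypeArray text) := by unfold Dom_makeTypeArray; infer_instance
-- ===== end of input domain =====

-- B labels the text run-by-run instead of A's reverse per-character pass; same cost, different decomposition.

-- ===== PORT A =====
-- the loop body of A: one iteration 'typeArray[i] = …' of the reverse for-loop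
def makeTypeArrayBody (cs : List Char) (ta : List String) (i : Int) : List String :=
  let c  := (PySem.List.pyGet? cs i).getD ' '       -- text[i]   (in range for every i the loop visits)
  let c1 := (PySem.List.pyGet? cs (i + 1)).getD ' ' -- text[i+1] (in range for every i the loop visits)
  if c1 < c then PySem.List.pySetD ta i "L"
  else if c = c1 then PySem.List.pySetD ta i ((PySem.List.pyGet? ta (i + 1)).getD "-1")
  else PySem.List.pySetD ta i "S"

def makeTypeArray (text : String) : List String :=
  let cs := text.toList
  let n := cs.length
  if n = 1 then ["S"]
  else
    -- typeArray = [-1]*n ; the int placeholder -1 is modelled as the string "-1"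
    -- (it is overwritten at every position before the function returns, for every n ≥ 1)
    let ta := List.replicate n "-1"
    let ta := PySem.List.pySetD ta (-1) "S"   -- typeArray[-1] = 'S'  (IndexError when n = 0: excluded by Pre_)
    let ta := PySem.List.pySetD ta (-2) "L"   -- typeArray[-2] = 'L'
    (PySem.List.pyRange ((n : Int) - 2) (-1) (-1)).foldl (makeTypeArrayBody cs) ta

-- ===== PORT B =====
-- maximal runs of equal characters, as (char, length) pairs, by a forward scan
def makeTypeArrayRuns (cs : List Char) : List (Char × Nat) :=
  match cs with
  | [] => []
  | c :: rest =>
      (c, 1 + (rest.takeWhile (· = c)).length) :: makeTypeArrayRuns (rest.dropWhile (· = c))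
  termination_by cs.length
  decreasing_by simp [List.length_cons]; exact List.length_dropWhile_le _ _

-- label each run: last run 'S'; earlier run 'L' iff its char is greater than the next run's char
def makeTypeArrayLabel : List (Char × Nat) → List String
  | [] => []
  | [(_, k)] => List.replicate k "S"
  | (c, k) :: (d, m) :: rs =>
      List.replicate k (if d < c then "L" else "S") ++ makeTypeArrayLabel ((d, m) :: rs)

def makeTypeArray_alt (text : String) : List String :=
  makeTypeArrayLabel (makeTypeArrayRuns text.toList)

-- ===== PRECONDITION & SPEC =====
-- Pre_ excludes exactly the empty string, on which A raises IndexError (typeArray[-1] on []).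
def Pre_makeTypeArray (text : String) : Prop := text ≠ ""
instance (text : String) : Decidable (Pre_makeTypeArray text) := by unfold Pre_makeTypeArray; infer_instance
def pvWitness_makeTypeArray : String := "banana"

def Spec_makeTypeArray (text : String) (out : List String) : Prop := out = makeTypeArray_alt text
instance (text : String) (out : List String) : Decidable (Spec_makeTypeArray text out) := by unfold Spec_makeTypeArray; infer_instance

-- ===== CLAIM =====
def Claim_equal_makeTypeArray : Prop := ∀ (text : String), Dom_makeTypeArray text → Pre_makeTypeArray text → Spec_makeTypeArray text (makeTypeArray text)

-- ===== LEMMAS AND PROOFS =====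

-- the L/S label of the first character of a nonempty suffix
def pvLabel : List Char → String
  | [] => "S"
  | [_] => "S"
  | a :: b :: r => if b < a then "L" else if a = b then pvLabel (b :: r) else "S"

-- labels of every suffix position
def pvLabels : List Char → List String
  | [] => []
  | c :: rest => pvLabel (c :: rest) :: pvLabels rest

theorem pvLabels_length (cs : List Char) : (pvLabels cs).length = cs.length := by
  induction cs with
  | nil => rfl
  | cons c rest ih => simp [pvLabels, ih]

-- index characterisation of pvLabels
theorem pvLabels_getElem (cs : List Char) (i : Nat) (h : i < cs.length) :
    (pvLabels cs)[i]'(by simpa [pvLabels_length] using h) = pvLabel (cs.drop i) := by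
  induction cs generalizing i with
  | nil => simp at h
  | cons c rest ih =>
    cases i with
    | zero => simp [pvLabels]
    | succ j =>
      simp only [pvLabels, List.getElem_cons_succ, List.drop_succ_cons]
      exact ih j (by simpa using h)

theorem pvLabel_step (cs : List Char) (k : Nat) (h : k + 1 < cs.length) :
    pvLabel (cs.drop k) =
      if cs[k + 1] < cs[k]'(by omega) then "L"
      else if cs[k]'(by omega) = cs[k + 1] then pvLabel (cs.drop (k + 1)) else "S" := by
  have h2 : cs.drop (k + 1) = cs[k + 1] :: cs.drop (k + 2) :=
    List.drop_eq_getElem_cons h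
  have h1 : cs.drop k = cs[k]'(by omega) :: cs[k + 1] :: cs.drop (k + 2) := by
    rw [List.drop_eq_getElem_cons (by omega : k < cs.length), ← h2]
  rw [h1, h2, pvLabel]

-- one loop iteration writes exactly the target label at position k
theorem body_eq (cs : List Char) (ta : List String) (k : Nat)
    (hk : k + 1 < cs.length) (hlen : ta.length = cs.length)
    (hdrop : ta.drop (k + 1) = (pvLabels cs).drop (k + 1)) :
    makeTypeArrayBody cs ta (k : Int) =
      ta.set k ((pvLabels cs)[k]'(by rw [pvLabels_length]; omega)) := by
  have hta : ta[k + 1]'(by omega) = (pvLabels cs)[k + 1]'(by rw [pvLabels_length]; omega) := by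
    have h0 := congrArg (fun l => l[0]?) hdrop
    simp only [List.getElem?_drop, Nat.add_zero] at h0
    rw [List.getElem?_eq_getElem (by omega), List.getElem?_eq_getElem (by rw [pvLabels_length]; omega)] at h0
    exact Option.some.inj h0
  have hcast : (k : Int) + 1 = ((k + 1 : Nat) : Int) := by push_cast; ring
  unfold makeTypeArrayBody
  rw [hcast]
  simp only [PySem.List.pyGet?_natCast, PySem.List.pySetD_natCast,
    List.getElem?_eq_getElem (show k < cs.length by omega),
    List.getElem?_eq_getElem (show k + 1 < cs.length from hk),
    List.getElem?_eq_getElem (show k + 1 < ta.length by omega),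
    Option.getD_some]
  rw [pvLabels_getElem cs k (by omega), pvLabel_step cs k hk, hta,
    pvLabels_getElem cs (k + 1) (by omega)]
  split_ifs <;> rfl

-- after overwriting position m with the target value, agreement extends one slot left
theorem set_drop_eq (ta tgt : List String) (m : Nat) (x : String)
    (hm : m < ta.length) (hlen : ta.length = tgt.length)
    (hx : x = tgt[m]'(by omega))
    (hdrop : ta.drop (m + 1) = tgt.drop (m + 1)) :
    (ta.set m x).drop m = tgt.drop m := by
  rw [List.drop_set]
  simp only [lt_irrefl, if_false, Nat.sub_self]
  rw [List.drop_eq_getElem_cons hm, List.drop_eq_getElem_cons (show m < tgt.length by omega)]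
  simp [hx, hdrop]

-- the reverse loop, started below k with the suffix already correct, produces all the labels
theorem loop_inv (cs : List Char) (k : Nat) : ∀ (ta : List String),
    k + 2 ≤ cs.length → ta.length = cs.length →
    ta.drop (k + 1) = (pvLabels cs).drop (k + 1) →
    (PySem.List.pyRange (k : Int) (-1) (-1)).foldl (makeTypeArrayBody cs) ta = pvLabels cs := by
  induction k with
  | zero =>
    intro ta h hlen hdrop
    rw [PySem.List.pyRange_neg_one_cons (by omega)]
    rw [show ((0 : Nat) : Int) - 1 = -1 by norm_num, PySem.List.pyRange_neg_one_eq_nil le_rfl]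
    simp only [List.foldl, Nat.cast_zero] at *
    rw [show (0 : Int) = ((0 : Nat) : Int) by norm_num,
      body_eq cs ta 0 (by omega) hlen hdrop]
    have h0 := set_drop_eq ta (pvLabels cs) 0 _ (by omega) (by rw [pvLabels_length, hlen])
      rfl hdrop
    simpa using h0
  | succ j ih =>
    intro ta h hlen hdrop
    rw [PySem.List.pyRange_neg_one_cons (by omega)]
    simp only [List.foldl]
    rw [show ((j + 1 : Nat) : Int) - 1 = ((j : Nat) : Int) by push_cast; ring]
    rw [body_eq cs ta (j + 1) (by omega) hlen hdrop]
    exact ih _ (by omega) (by simpa using hlen)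
      (set_drop_eq ta (pvLabels cs) (j + 1) _ (by omega) (by rw [pvLabels_length, hlen]) rfl hdrop)

-- Port A computes the suffix labels
theorem pySetD_neg_one' (xs : List String) (v : String) (h : 1 ≤ xs.length) :
    PySem.List.pySetD xs (-1) v = xs.set (xs.length - 1) v := by
  simp [PySem.List.pySetD, PySem.List.pySet?, PySem.List.pyIdx?, h]

theorem pySetD_neg_two' (xs : List String) (v : String) (h : 2 ≤ xs.length) :
    PySem.List.pySetD xs (-2) v = xs.set (xs.length - 2) v := by
  simp [PySem.List.pySetD, PySem.List.pySet?, PySem.List.pyIdx?, h]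

theorem A_eq_pvLabels (text : String) (h : text.toList ≠ []) :
    makeTypeArray text = pvLabels text.toList := by
  unfold makeTypeArray
  rcases hcs : text.toList with _ | ⟨a, l⟩
  · exact absurd hcs h
  · rcases l with _ | ⟨b, l'⟩
    · simp [pvLabels, pvLabel]
    · have h2 : 2 ≤ (a :: b :: l').length := by simp
      have h1 : ¬ (a :: b :: l').length = 1 := by simp
      rw [if_neg h1]
      set cs : List Char := a :: b :: l' with hcs'
      set n : Nat := cs.length with hn
      have hn2 : 2 ≤ n := h2
      show List.foldl (makeTypeArrayBody cs)
          (PySem.List.pySetD (PySem.List.pySetD (List.replicate n "-1") (-1) "S") (-2) "L")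
          (PySem.List.pyRange ((n : Int) - 2) (-1) (-1)) = pvLabels cs
      rw [pySetD_neg_one' _ _ (by simp [List.length_replicate]; omega),
        List.length_replicate]
      rw [pySetD_neg_two' _ _ (by simp; omega)]
      simp only [List.length_set, List.length_replicate]
      set ta0 : List String := ((List.replicate n "-1").set (n - 1) "S").set (n - 2) "L" with hta0
      have hlen0 : ta0.length = n := by simp [hta0]
      have hdrop0 : ta0.drop (n - 1) = (pvLabels cs).drop (n - 1) := by
        have l1 : ta0.drop (n - 1) = ((List.replicate n ("-1" : String)).set (n - 1) "S").drop (n - 1) := by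
          rw [hta0, List.drop_set, if_pos (by omega)]
        have l2 : ((List.replicate n ("-1" : String)).set (n - 1) "S").drop (n - 1)
            = ((List.replicate n ("-1" : String)).drop (n - 1)).set 0 "S" := by
          rw [List.drop_set, if_neg (by omega), Nat.sub_self]
        have l3 : (List.replicate n ("-1" : String)).drop (n - 1) = ["-1"] := by
          rw [List.drop_replicate]
          rw [show n - (n - 1) = 1 by omega]
          simp
        have r1 : (pvLabels cs).drop (n - 1) = ["S"] := by
          rw [List.drop_eq_getElem_cons (by rw [pvLabels_length]; omega)]
          rw [show n - 1 + 1 = n by omega]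
          rw [List.drop_eq_nil_of_le (by rw [pvLabels_length])]
          rw [pvLabels_getElem cs (n - 1) (by omega)]
          rw [List.drop_eq_getElem_cons (show n - 1 < cs.length by omega)]
          rw [show n - 1 + 1 = n by omega, List.drop_eq_nil_of_le le_rfl]
          rfl
        rw [l1, l2, l3, r1]
        rfl
      have hcast : ((n : Int)) - 2 = (((n - 2 : Nat)) : Int) := by omega
      rw [hcast]
      refine loop_inv cs (n - 2) ta0 (by omega) hlen0 ?_
      rw [show n - 2 + 1 = n - 1 by omega]
      exact hdrop0

-- ===== B side =====
theorem pvLabels_all_eq (c : Char) : ∀ (t : List Char), (∀ x ∈ t, x = c) →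
    pvLabels (c :: t) = List.replicate (t.length + 1) "S" := by
  intro t
  induction t with
  | nil => intro _; rfl
  | cons b t' ih =>
    intro hb
    have hb' : c = b := (hb b (by simp)).symm
    subst hb'
    have ih' := ih (fun x hx => hb x (by simp [hx]))
    have hhead : pvLabel (c :: t') = "S" := by
      have := congrArg (fun l => l.headD "") ih'
      simpa [pvLabels] using this
    simp only [pvLabels] at ih' ⊢
    rw [show pvLabel (c :: c :: t') = pvLabel (c :: t') by simp [pvLabel]]
    rw [List.replicate_succ, hhead] at ih'
    injection ih' with _ htail
    simp [hhead, htail, List.replicate_succ]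

theorem pvLabels_run (c e : Char) (d' : List Char) (hne : e ≠ c) : ∀ (t : List Char), (∀ x ∈ t, x = c) →
    pvLabels (c :: (t ++ e :: d')) =
      List.replicate (t.length + 1) (if e < c then "L" else "S") ++ pvLabels (e :: d') := by
  intro t
  induction t with
  | nil =>
    intro _
    simp only [List.nil_append, pvLabels, List.length_nil]
    rw [show pvLabel (c :: e :: d') = if e < c then "L" else "S" from by
      rw [pvLabel, if_neg (Ne.symm hne)]]
    rfl
  | cons b t' ih =>
    intro hb
    have hb' : c = b := (hb b (by simp)).symm
    subst hb'
    have ih' := ih (fun x hx => hb x (by simp [hx]))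
    have hhead : pvLabel (c :: (t' ++ e :: d')) = (if e < c then "L" else "S") := by
      have := congrArg (fun l => l.headD "") ih'
      simpa [pvLabels] using this
    simp only [List.cons_append, pvLabels] at ih' ⊢
    rw [show pvLabel (c :: c :: (t' ++ e :: d')) = pvLabel (c :: (t' ++ e :: d')) from by
      simp [pvLabel]]
    rw [List.replicate_succ, List.cons_append, hhead] at ih'
    injection ih' with _ htail
    simp [hhead, htail, List.replicate_succ]

theorem B_eq_pvLabels : ∀ (fuel : Nat) (cs : List Char), cs.length ≤ fuel →
    makeTypeArrayLabel (makeTypeArrayRuns cs) = pvLabels cs := by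
  intro fuel
  induction fuel with
  | zero =>
    intro cs hcs
    have : cs = [] := by cases cs <;> simp_all
    subst this
    simp [makeTypeArrayRuns, makeTypeArrayLabel, pvLabels]
  | succ m ih =>
    intro cs hcs
    rcases cs with _ | ⟨c, rest⟩
    · simp [makeTypeArrayRuns, makeTypeArrayLabel, pvLabels]
    · have hsplit : rest = rest.takeWhile (· = c) ++ rest.dropWhile (· = c) :=
        (List.takeWhile_append_dropWhile).symm
      have ht : ∀ x ∈ rest.takeWhile (· = c), x = c := by
        intro x hx
        simpa using List.mem_takeWhile_imp hx
      rw [makeTypeArrayRuns]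
      rcases hd : rest.dropWhile (· = c) with _ | ⟨e, d'⟩
      · have hrest : rest = rest.takeWhile (· = c) := by
          conv_lhs => rw [hsplit]
          rw [hd, List.append_nil]
        rw [show makeTypeArrayRuns ([] : List Char) = [] from by rw [makeTypeArrayRuns],
          makeTypeArrayLabel]
        conv_rhs => rw [show (c :: rest) = c :: rest.takeWhile (· = c) from by rw [← hrest]]
        rw [pvLabels_all_eq c _ ht, Nat.add_comm]
      · have hne : e ≠ c := by
          have hnil : rest.dropWhile (· = c) ≠ [] := by rw [hd]; simp
          have := List.head_dropWhile_not (p := (· = c)) (l := rest) hnil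
          simp only [hd, List.head_cons] at this
          simpa using this
        obtain ⟨m', rs, hr⟩ : ∃ m' rs, makeTypeArrayRuns (e :: d') = (e, m') :: rs :=
          ⟨_, _, by rw [makeTypeArrayRuns]⟩
        have hlen' : (e :: d').length ≤ rest.length := by
          have := List.length_dropWhile_le (p := (· = c)) (l := rest)
          rwa [hd] at this
        rw [hr, makeTypeArrayLabel, ← hr, ih (e :: d') (by have h' := hlen'; simp at hcs h' ⊢; omega)]
        conv_rhs => rw [show (c :: rest) = c :: (rest.takeWhile (· = c) ++ e :: d') from by
          rw [← hd, ← hsplit]]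
        rw [pvLabels_run c e d' hne _ ht, Nat.add_comm]

theorem makeTypeArray_spec : Claim_equal_makeTypeArray := by
  intro text hdom hpre
  unfold Spec_makeTypeArray makeTypeArray_alt
  have h : text.toList ≠ [] := by
    intro hc
    exact hpre (by rwa [← String.toList_eq_nil_iff])
  rw [A_eq_pvLabels text h, B_eq_pvLabels text.toList.length text.toList le_rfl]
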